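-- pv_equiv track=rewrite | github.com/varshaajio/LeetCode | solutions/4186-count-residue-prefixes/solution.py | residuePrefixes
-- ===== SOURCE A (Python) =====
-- def residuePrefixes(s: str) -> int:
--     s1=''
--     c=0
--     for i in range(len(s)):
--         s1+=s[i]
--         if len(set(s1))==len(s1)%3:
--             c+=1
--     return c
-- ===== SOURCE B (Python) =====
-- def residuePrefixes(s: str) -> int:
--     # Pass 1: build the table of prefix distinct-character counts in O(n).
--     seen = set()
--     table = []
--     for ch in s:
--         seen.add(ch)
--         table.append(len(seen))
--     # Pass 2: count prefixes whose distinct count equals (length mod 3).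
--     return sum(1 for i, d in enumerate(table) if d == (i + 1) % 3)
-- ===== Notes on version B (the rewrite author's own statement) =====
-- stated objective: faster
-- what changed: B builds a prefix distinct-count table once with a running seen-set (instead of rebuilding set(s1) from scratch for every prefix) and then counts matching indices in a separate enumerate pass.
import Mathlib
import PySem

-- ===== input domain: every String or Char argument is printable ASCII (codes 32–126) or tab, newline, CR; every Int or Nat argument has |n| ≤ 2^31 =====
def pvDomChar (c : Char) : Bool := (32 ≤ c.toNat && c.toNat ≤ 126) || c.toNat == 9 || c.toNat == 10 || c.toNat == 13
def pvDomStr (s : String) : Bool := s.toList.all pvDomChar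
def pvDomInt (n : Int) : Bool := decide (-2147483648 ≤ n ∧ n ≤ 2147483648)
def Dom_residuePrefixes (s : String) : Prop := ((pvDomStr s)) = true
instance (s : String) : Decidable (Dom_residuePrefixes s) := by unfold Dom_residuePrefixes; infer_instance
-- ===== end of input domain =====

-- B replaces A's O(n^2) per-prefix set(s1) rebuilding by one O(n) running-set pass building a
-- prefix distinct-count table plus a separate enumerate-and-count pass (return value only).

-- ===== PORT A =====
def residuePrefixes (s : String) : Int :=
  ((PySem.List.pyRange 0 (PySem.Str.len s) 1).foldl
    (fun (st : List Char × Int) i =>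
      let s1 := st.1 ++ [PySem.List.pyGetD s.toList i ' ']
      (s1, if ((PySem.Set.ofList s1).length : Int) == PySem.Int.mod (s1.length : Int) 3
           then st.2 + 1 else st.2))
    (([] : List Char), (0 : Int))).2

-- ===== PORT B =====
def residuePrefixes_alt (s : String) : Int :=
  let table := (s.toList.foldl
    (fun (st : PySem.Set Char × List Int) ch =>
      let seen := PySem.Set.add st.1 ch
      (seen, st.2 ++ [((seen.length : Int))]))
    ((PySem.Set.empty : PySem.Set Char), ([] : List Int))).2
  (((PySem.List.enumerate table 0).filter
      (fun p => p.2 == PySem.Int.mod (p.1 + 1) 3)).length : Int)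

-- ===== PRECONDITION & SPEC =====
def Spec_residuePrefixes (s : String) (out : Int) : Prop := out = residuePrefixes_alt s
instance (s : String) (out : Int) : Decidable (Spec_residuePrefixes s out) := by unfold Spec_residuePrefixes; infer_instance

-- ===== CLAIM (what is proved, stated in full; the proofs are below) =====
def Claim_equal_residuePrefixes : Prop := ∀ (s : String), Dom_residuePrefixes s → Spec_residuePrefixes s (residuePrefixes s)

-- ===== LEMMAS AND PROOFS =====

-- reference count: walking the remaining chars with the current seen-set and prefix length
def pvCountRef (seen : PySem.Set Char) (n : Int) : List Char → Int
  | [] => 0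
  | ch :: l =>
      let seen' := PySem.Set.add seen ch
      (if ((seen'.length : Int)) == PySem.Int.mod (n + 1) 3 then 1 else 0)
        + pvCountRef seen' (n + 1) l

lemma pvOfList_append_singleton {p : List Char} {ch : Char} :
    PySem.Set.ofList (p ++ [ch]) = PySem.Set.add (PySem.Set.ofList p) ch := by
  simp [PySem.Set.ofList, List.foldl_append]

lemma pvA_fold (l p : List Char) (c : Int) :
    (l.foldl
      (fun (st : List Char × Int) ch =>
        let s1 := st.1 ++ [ch]
        (s1, if ((PySem.Set.ofList s1).length : Int) == PySem.Int.mod (s1.length : Int) 3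
             then st.2 + 1 else st.2))
      (p, c)).2
    = c + pvCountRef (PySem.Set.ofList p) (p.length : Int) l := by
  induction l generalizing p c with
  | nil => simp [pvCountRef]
  | cons ch l ih =>
      simp only [List.foldl_cons, pvCountRef]
      rw [ih]
      rw [pvOfList_append_singleton]
      have hlen : ((p ++ [ch]).length : Int) = (p.length : Int) + 1 := by
        simp
      rw [hlen]
      split <;> omega

def pvTableFrom (seen : PySem.Set Char) : List Char → List Int
  | [] => []
  | ch :: l => ((PySem.Set.add seen ch).length : Int) :: pvTableFrom (PySem.Set.add seen ch) l

lemma pvB_table (l : List Char) (seen : PySem.Set Char) (t : List Int) :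
    (l.foldl
      (fun (st : PySem.Set Char × List Int) ch =>
        let seen := PySem.Set.add st.1 ch
        (seen, st.2 ++ [((seen.length : Int))]))
      (seen, t)).2
    = t ++ (pvTableFrom seen l) := by
  induction l generalizing seen t with
  | nil => simp [pvTableFrom]
  | cons ch l ih => simp [pvTableFrom, ih]

lemma pvB_count (l : List Char) (seen : PySem.Set Char) (n : Int) :
    (((PySem.List.enumerate (pvTableFrom seen l) n).filter
        (fun p => p.2 == PySem.Int.mod (p.1 + 1) 3)).length : Int)
    = pvCountRef seen n l := by
  induction l generalizing seen n with
  | nil => simp [pvTableFrom, pvCountRef, PySem.List.enumerate_nil]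
  | cons ch l ih =>
      simp only [pvTableFrom, pvCountRef, PySem.List.enumerate_cons, List.filter_cons]
      split <;> simp_all <;> omega

-- ===== VERDICT (by name: the statement is the Claim_ definition above) =====
theorem residuePrefixes_spec : Claim_equal_residuePrefixes := by
  intro s _
  unfold Spec_residuePrefixes residuePrefixes residuePrefixes_alt
  rw [show PySem.Str.len s = ((s.toList).length : Int) from by simp [PySem.Str.len]]
  rw [PySem.List.foldl_pyRange_zero_pyGetD' s.toList ' '
        (f := fun (st : List Char × Int) ch =>
          let s1 := st.1 ++ [ch]
          (s1, if ((PySem.Set.ofList s1).length : Int) == PySem.Int.mod (s1.length : Int) 3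
               then st.2 + 1 else st.2))]
  rw [pvA_fold, pvB_table]
  simpa [PySem.Set.ofList, PySem.Set.empty] using (pvB_count s.toList PySem.Set.empty 0).symm
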